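-- pv_equiv track=rewrite | github.com/clevergirl123/android_apk_spider | workspace/spider_news_mi.py | simplify_apk
-- ===== SOURCE A (Python) =====
-- def simplify_apk(apk_name):
--     apk_name = apk_name[:-4]
--     res_name = ".apk"
--     if len(apk_name.split(".")) > 1:
--         pk_list = apk_name.split("_")
--         flag = False
--         for i in pk_list[::-1]:
--             if flag:
--                 res_name = i + "_" + res_name
--                 continue
--             if not i.isdigit():
--                 flag = True
--                 res_name = i + res_name
--     else:
--         res_name = apk_name + res_name
--     return res_name
-- ===== SOURCE B (Python) =====
-- def simplify_apk(apk_name):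
--     base = apk_name[:-4]
--     if "." not in base:
--         return base + ".apk"
--     parts = base.split("_")
--     i = len(parts)
--     while i > 0 and parts[i - 1].isdigit():
--         i -= 1
--     return "_".join(parts[:i]) + ".apk"
-- ===== Notes on version B (the rewrite author's own statement) =====
-- stated objective: simpler
-- what changed: Replaced A's reversed-iteration state machine (flag + string prepended piece by piece) with a two-phase decomposition: find the cut index by trimming trailing all-digit segments, then join parts[:i] once.
import Mathlib
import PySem

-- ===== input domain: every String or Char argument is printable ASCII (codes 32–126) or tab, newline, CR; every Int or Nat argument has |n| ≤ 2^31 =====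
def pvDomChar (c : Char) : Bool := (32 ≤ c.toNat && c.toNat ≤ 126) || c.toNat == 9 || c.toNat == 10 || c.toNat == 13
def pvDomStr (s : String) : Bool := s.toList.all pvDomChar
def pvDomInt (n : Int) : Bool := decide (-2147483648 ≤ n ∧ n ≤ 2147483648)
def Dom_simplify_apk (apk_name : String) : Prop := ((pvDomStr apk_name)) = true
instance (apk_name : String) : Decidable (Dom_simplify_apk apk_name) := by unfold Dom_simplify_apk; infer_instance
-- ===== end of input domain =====

-- B is a simpler decomposition of A: compute the cut index, then join once (same return value everywhere; A is total).

-- ===== PORT A =====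
-- the loop body of A's 'for i in pk_list[::-1]' (state = (flag, res_name)); ports work on List Char
-- (PySem.Str functions are thin wrappers over PySem.Chars; Python's '+' on str is '++' on the char lists)
def simplifyStepA (st : Bool × List Char) (i : List Char) : Bool × List Char :=
  if st.1 then (st.1, i ++ '_' :: st.2)
  else if ¬ PySem.Chars.strIsdigit i then (true, i ++ st.2)
  else st

def simplify_apk (apk_name : String) : String :=
  let base := PySem.List.slice apk_name.toList none (some (-4))      -- apk_name[:-4]
  let res0 : List Char := ['.', 'a', 'p', 'k']                        -- ".apk"
  if (PySem.Chars.splitOn base ['.']).length > 1 then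
    let pk_list := PySem.Chars.splitOn base ['_']
    -- for i in pk_list[::-1]: … (pk_list[::-1] = pk_list.reverse, PySem.List.slice?_none_none_neg_one)
    String.mk (pk_list.reverse.foldl simplifyStepA (false, res0)).2
  else String.mk (base ++ res0)

-- ===== PORT B =====
-- Source B's 'i = len(parts); while i > 0 and parts[i-1].isdigit(): i -= 1' as recursion on i
def trimCut (parts : List (List Char)) : Nat → Nat
  | 0 => 0
  | i + 1 => if PySem.Chars.strIsdigit (parts.getD i []) then trimCut parts i else i + 1

def simplify_apk_alt (apk_name : String) : String :=
  let base := PySem.List.slice apk_name.toList none (some (-4))      -- apk_name[:-4]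
  if PySem.Chars.isIn ['.'] base = false then String.mk (base ++ ['.', 'a', 'p', 'k'])
  else
    let parts := PySem.Chars.splitOn base ['_']
    let i := trimCut parts parts.length
    String.mk (PySem.Chars.join ['_'] (parts.take i) ++ ['.', 'a', 'p', 'k'])

-- ===== PRECONDITION & SPEC =====
def Spec_simplify_apk (apk_name : String) (out : String) : Prop := out = simplify_apk_alt apk_name
instance (apk_name : String) (out : String) : Decidable (Spec_simplify_apk apk_name out) := by unfold Spec_simplify_apk; infer_instance

-- ===== CLAIM (what is proved, stated in full; the proofs are below) =====
def Claim_equal_simplify_apk : Prop := ∀ (apk_name : String), Dom_simplify_apk apk_name → Spec_simplify_apk apk_name (simplify_apk apk_name)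

-- ===== LEMMAS AND PROOFS =====

theorem trimCut_le (parts : List (List Char)) (i : Nat) : trimCut parts i ≤ i := by
  induction i with
  | zero => simp [trimCut]
  | succ n ih => simp only [trimCut]; split <;> omega

theorem trimCut_append (ps : List (List Char)) (p : List Char) (i : Nat) (h : i ≤ ps.length) :
    trimCut (ps ++ [p]) i = trimCut ps i := by
  induction i with
  | zero => rfl
  | succ n ih =>
    simp only [trimCut]
    rw [List.getD_append _ _ _ _ (by omega)]
    split
    · exact ih (by omega)
    · rfl

-- once the flag is set, A's loop just prepends every remaining segment with '_'
theorem foldl_flag_true (qs : List (List Char)) (r : List Char) :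
    qs.reverse.foldl simplifyStepA (true, r)
      = (true, (qs.foldr (fun q acc => q ++ '_' :: acc) r)) := by
  induction qs generalizing r with
  | nil => rfl
  | cons q qs ih =>
    simp only [List.reverse_cons, List.foldl_append, List.foldl_cons, List.foldl_nil, ih]
    rfl

theorem foldr_join (qs : List (List Char)) (p r : List Char) :
    qs.foldr (fun q acc => q ++ '_' :: acc) (p ++ r)
      = PySem.Chars.join ['_'] (qs ++ [p]) ++ r := by
  induction qs with
  | nil => simp [PySem.Chars.join, List.intercalate]
  | cons q qs ih =>
    simp only [List.foldr_cons, ih, List.cons_append]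
    cases qs <;> simp [PySem.Chars.join, List.intercalate, List.intersperse]

-- A's whole loop equals B's cut-then-join
theorem loop_eq_join (parts : List (List Char)) :
    (parts.reverse.foldl simplifyStepA (false, ['.', 'a', 'p', 'k'])).2
      = PySem.Chars.join ['_'] (parts.take (trimCut parts parts.length)) ++ ['.', 'a', 'p', 'k'] := by
  induction parts using List.reverseRecOn with
  | nil => simp [trimCut, PySem.Chars.join, List.intercalate]
  | append_singleton ps p ih =>
    simp only [List.reverse_append, List.reverse_cons, List.reverse_nil, List.nil_append,
      List.singleton_append, List.foldl_cons, List.length_append, List.length_cons,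
      List.length_nil, Nat.zero_add]
    by_cases hd : PySem.Chars.strIsdigit p
    · -- trailing digit segment: A skips it, B trims it
      have hstep : simplifyStepA (false, ['.', 'a', 'p', 'k']) p = (false, ['.', 'a', 'p', 'k']) := by
        simp [simplifyStepA, hd]
      have hcut : trimCut (ps ++ [p]) (ps.length + 1) = trimCut ps ps.length := by
        simp [trimCut, hd, trimCut_append ps p ps.length (le_refl _)]
      rw [hstep, hcut, ih, List.take_append_of_le_length (trimCut_le ps ps.length)]
    · -- first non-digit from the right: flag set, everything joins
      have hstep : simplifyStepA (false, ['.', 'a', 'p', 'k']) p = (true, p ++ ['.', 'a', 'p', 'k']) := by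
        simp [simplifyStepA, hd]
      have hcut : trimCut (ps ++ [p]) (ps.length + 1) = ps.length + 1 := by
        simp [trimCut, hd]
      rw [hstep, hcut, foldl_flag_true, foldr_join,
        List.take_of_length_le (by simp)]

-- (splitOn.go with a single-char separator) result length counts the occurrences of the char
theorem splitOn_go_length (c : Char) (fuel : Nat) :
    ∀ (l cur : List Char) (acc : List (List Char)), l.length ≤ fuel →
      (PySem.Chars.splitOn.go [c] fuel l cur acc).length = acc.length + 1 + l.count c := by
  induction fuel with
  | zero =>
    intro l cur acc h
    have : l = [] := List.eq_nil_of_length_eq_zero (by omega)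
    subst this
    simp [PySem.Chars.splitOn.go]
  | succ n ih =>
    intro l cur acc h
    cases l with
    | nil => simp [PySem.Chars.splitOn.go]
    | cons x rest =>
      rw [PySem.Chars.splitOn.go]
      by_cases hx : x = c
      · subst hx
        simp only [List.isPrefixOf, BEq.rfl, Bool.true_and, if_true,
          List.length_cons, List.length_nil, List.drop_succ_cons, List.drop_zero]
        rw [ih _ _ _ (by simpa using Nat.le_of_succ_le_succ h)]
        simp only [List.count_cons_self, List.length_cons]
        omega
      · have hpre : ([c].isPrefixOf (x :: rest)) = false := by
          simp [List.isPrefixOf]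
          exact fun hh => absurd hh.symm hx
        rw [if_neg (by simp [hpre])]
        rw [ih _ _ _ (by simpa using Nat.le_of_succ_le_succ (by simpa using h))]
        simp [hx]

theorem splitOn_length_gt_one_iff (c : Char) (s : List Char) :
    ((PySem.Chars.splitOn s [c]).length > 1) ↔ c ∈ s := by
  rw [PySem.Chars.splitOn, splitOn_go_length c _ s [] [] (by omega)]
  simp [List.count_pos_iff]

theorem isIn_singleton_iff (c : Char) (s : List Char) :
    PySem.Chars.isIn [c] s = true ↔ c ∈ s := by
  rw [PySem.Chars.isIn_iff_infix]
  constructor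
  · rintro ⟨a, b, hab⟩; rw [← hab]; simp
  · intro h
    obtain ⟨a, b, hab⟩ := List.append_of_mem h
    exact ⟨a, b, by simp [hab]⟩

-- ===== VERDICT (by name: the statement is the Claim_ definition above) =====
theorem simplify_apk_spec : Claim_equal_simplify_apk := by
  intro apk_name _
  unfold Spec_simplify_apk simplify_apk simplify_apk_alt
  simp only []
  set base := PySem.List.slice apk_name.toList none (some (-4)) with hbase
  by_cases hmem : '.' ∈ base
  · rw [if_pos ((splitOn_length_gt_one_iff '.' base).mpr hmem),
        if_neg (by simp [(isIn_singleton_iff '.' base).mpr hmem])]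
    rw [loop_eq_join]
  · rw [if_neg ((splitOn_length_gt_one_iff '.' base).not.mpr hmem),
        if_pos (by simp [(isIn_singleton_iff '.' base).not.mpr hmem])]
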